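-- pv_equiv track=rewrite | github.com/yejin7211/Algorithm | 프로그래머스/lv2/42860. 조이스틱/조이스틱.py | solution
-- ===== SOURCE A (Python) =====
-- def solution(name):
--     answer = 0
--     for c in name:
--         answer += min(ord('Z') - ord(c) + 1, ord(c) - ord('A'))
--     answer += len(name) - 1
--     if not 'A' in name:
--         return answer
--
--     i = 0
--     sections = []
--     while i < len(name):
--         if name[i] == 'A':
--             arr = [i, i - 1]
--             while i < len(name) and name[i] == 'A':
--                 arr[1] += 1
--                 i += 1
--             sections.append(arr)
--         else:
--             i += 1
--
--     for s, e in sections: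
--         count = 0
--         for i in range(s):
--             count += min(ord('Z') - ord(name[i]) + 1, ord(name[i]) - ord('A'))
--         for i in range(e+1, len(name)):
--             count += min(ord('Z') - ord(name[i]) + 1, ord(name[i]) - ord('A'))
--
--         if s == 0:
--             answer = min(answer, count + len(name[e+1:]))
--         elif e == len(name) - 1:
--             answer = min(answer, count + len(name[:s]) - 1)
--         else:
--             answer = min(answer, count + (len(name[:s])-1) * 2 + len(name[e+1:]))
--             answer = min(answer, count + 1 + (len(name[e+1:])-1) * 2 + 1 + len(name[:s]) - 1 )
--     return answer
-- ===== SOURCE B (Python) =====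
-- # cost of turning one wheel position to its letter, indexed by character code
-- _COST = [min(ord('Z') - o + 1, o - ord('A')) for o in range(128)]
--
-- def solution(name):
--     # total vertical cost is independent of visiting order: compute it once, at C speed
--     V = sum(map(_COST.__getitem__, name.encode()))
--     n = len(name)
--     best = V + n - 1
--     if 'A' not in name:
--         return best
--     # one pass over the maximal runs of 'A', O(1) work per run
--     i = 0
--     while i < n:
--         if name[i] != 'A':
--             i += 1
--             continue
--         s = i
--         while i < n and name[i] == 'A':
--             i += 1
--         e = i - 1
--         if s == 0:
--             best = min(best, V + (n - e - 1))
--         elif e == n - 1: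
--             best = min(best, V + s - 1)
--         else:
--             best = min(best, V + (s - 1) * 2 + (n - e - 1))
--             best = min(best, V + 2 + (n - e - 2) * 2 + s - 1)
--     return best
-- ===== Notes on version B (the rewrite author's own statement) =====
-- stated objective: faster
-- what changed: B computes the total vertical (letter) cost once via a precomputed 128-entry table and handles each maximal 'A'-run in O(1) from its boundaries, instead of A's re-summing the vertical cost of the whole rest of the string for every run.
import Mathlib
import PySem

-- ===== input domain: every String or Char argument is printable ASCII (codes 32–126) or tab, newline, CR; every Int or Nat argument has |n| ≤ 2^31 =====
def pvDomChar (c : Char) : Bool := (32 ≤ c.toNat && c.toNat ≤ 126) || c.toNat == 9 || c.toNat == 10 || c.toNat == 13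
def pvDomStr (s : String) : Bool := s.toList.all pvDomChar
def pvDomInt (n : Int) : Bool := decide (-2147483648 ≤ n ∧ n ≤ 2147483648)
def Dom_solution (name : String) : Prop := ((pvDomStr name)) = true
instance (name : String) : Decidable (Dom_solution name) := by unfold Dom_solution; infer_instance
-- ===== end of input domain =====

-- B computes the total vertical cost once (table-driven) and handles each 'A'-run in O(1);
-- A re-sums the vertical cost of everything outside the run for every 'A'-run.

-- min(ord('Z') - ord(c) + 1, ord(c) - ord('A')) — used verbatim by both Pythons
def pvCost (c : Char) : Int := min (90 - (c.toNat : Int) + 1) ((c.toNat : Int) - 65)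

-- the inner `while i < len(name) and name[i] == 'A': i += 1` of both Pythons
def pvSkipA : List Char → Int → List Char × Int
  | [], i => ([], i)
  | c :: rest, i => if c = 'A' then pvSkipA rest (i + 1) else (c :: rest, i)

theorem pvSkipA_fst_length_le (cs : List Char) (i : Int) :
    (pvSkipA cs i).1.length ≤ cs.length := by
  induction cs generalizing i with
  | nil => simp [pvSkipA]
  | cons c rest ih =>
    by_cases hc : c = 'A'
    · simp only [pvSkipA, hc]
      exact le_trans (ih (i + 1)) (by simp)
    · simp [pvSkipA, hc]

-- ===== PORT A =====

-- A's first while loop: collect the maximal 'A'-runs as (start, end) pairs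
def pvSections : List Char → Int → List (Int × Int)
  | [], _ => []
  | c :: rest, i =>
    if c = 'A' then
      let p := pvSkipA rest (i + 1)
      (i, p.2 - 1) :: pvSections p.1 p.2
    else
      pvSections rest (i + 1)
termination_by cs _ => cs.length
decreasing_by
  · exact Nat.lt_succ_of_le (pvSkipA_fst_length_le rest (i + 1))
  · simp

-- the body of A's `for s, e in sections` loop: re-sum the cost outside [s, e], then try the options
def pvAUpd (cs : List Char) (n : Int) (answer : Int) (se : Int × Int) : Int :=
  let s := se.1
  let e := se.2
  let count := (PySem.List.pyRange 0 s 1).foldl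
                 (fun a i => a + pvCost (PySem.List.pyGetD cs i ' ')) 0
             + (PySem.List.pyRange (e + 1) n 1).foldl
                 (fun a i => a + pvCost (PySem.List.pyGetD cs i ' ')) 0
  if s = 0 then
    min answer (count + ((PySem.List.slice cs (some (e + 1)) none).length : Int))
  else if e = n - 1 then
    min answer (count + ((PySem.List.slice cs none (some s)).length : Int) - 1)
  else
    min (min answer
          (count + (((PySem.List.slice cs none (some s)).length : Int) - 1) * 2
                 + ((PySem.List.slice cs (some (e + 1)) none).length : Int)))
        (count + 1 + (((PySem.List.slice cs (some (e + 1)) none).length : Int) - 1) * 2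
               + 1 + ((PySem.List.slice cs none (some s)).length : Int) - 1)

def solution (name : String) : Int :=
  let cs := name.toList
  let n : Int := cs.length
  let answer := cs.foldl (fun a c => a + pvCost c) 0 + n - 1
  if ¬ cs.contains 'A' then answer
  else (pvSections cs 0).foldl (pvAUpd cs n) answer

-- ===== PORT B =====

-- B's precomputed cost table _COST, indexed by character code
def pvTable : List Int := (PySem.List.pyRange 0 128 1).map (fun o => min (90 - o + 1) (o - 65))

-- B's O(1) treatment of the run [s, e]: the precomputed V replaces A's re-summation
def pvBUpd (n V best s e : Int) : Int :=
  if s = 0 then min best (V + (n - e - 1))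
  else if e = n - 1 then min best (V + s - 1)
  else min (min best (V + (s - 1) * 2 + (n - e - 1)))
           (V + 2 + (n - e - 2) * 2 + s - 1)

-- B's single pass over the 'A'-runs (n and V are fixed)
def pvScan : List Char → Int → Int → Int → Int → Int
  | [], _, _, _, best => best
  | c :: rest, i, n, V, best =>
    if c ≠ 'A' then pvScan rest (i + 1) n V best
    else
      let p := pvSkipA rest (i + 1)
      pvScan p.1 p.2 n V (pvBUpd n V best i (p.2 - 1))
termination_by cs _ _ _ _ => cs.length
decreasing_by
  · simp
  · exact Nat.lt_succ_of_le (pvSkipA_fst_length_le rest (i + 1))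

def solution_alt (name : String) : Int :=
  let cs := name.toList
  let V := (cs.map (fun c => PySem.List.pyGetD pvTable (c.toNat : Int) 0)).sum
  let n : Int := cs.length
  let best := V + n - 1
  if ¬ cs.contains 'A' then best
  else pvScan cs 0 n V best

-- ===== PRECONDITION & SPEC =====
def Spec_solution (name : String) (out : Int) : Prop := out = solution_alt name
instance (name : String) (out : Int) : Decidable (Spec_solution name out) := by unfold Spec_solution; infer_instance

-- ===== CLAIM (what is proved, stated in full; the proofs are below) =====
def Claim_equal_solution : Prop := ∀ (name : String), Dom_solution name → Spec_solution name (solution name)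

-- ===== LEMMAS AND PROOFS =====

theorem pvSkipA_spec (cs : List Char) (i : Int) :
    ∃ k : Nat, k ≤ cs.length ∧ (pvSkipA cs i).2 = i + k ∧ (pvSkipA cs i).1 = cs.drop k ∧
      ∀ j : Nat, j < k → cs[j]? = some 'A' := by
  induction cs generalizing i with
  | nil => exact ⟨0, by simp [pvSkipA]⟩
  | cons c rest ih =>
    by_cases hc : c = 'A'
    · obtain ⟨k, hk, h2, h1, hA⟩ := ih (i + 1)
      have hstep : pvSkipA (c :: rest) i = pvSkipA rest (i + 1) := by
        rw [pvSkipA, if_pos hc]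
      refine ⟨k + 1, by simpa using hk, ?_, ?_, ?_⟩
      · rw [hstep, h2]; push_cast; ring
      · rw [hstep, h1, List.drop_succ_cons]
      · intro j hj
        cases j with
        | zero => simp [hc]
        | succ m => simpa using hA m (by omega)
    · exact ⟨0, by simp [pvSkipA, hc]⟩

-- A's per-section re-summation equals the total vertical cost V: the section itself is all 'A'
theorem count_eq_V (full : List Char) (s e : Int) (h0 : 0 ≤ s) (hse : s ≤ e)
    (hen : e < (full.length : Int))
    (hA : ∀ j : Int, s ≤ j → j ≤ e → PySem.List.pyGetD full j ' ' = 'A') :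
    (PySem.List.pyRange 0 s 1).foldl (fun a i => a + pvCost (PySem.List.pyGetD full i ' ')) 0
      + (PySem.List.pyRange (e + 1) (full.length : Int) 1).foldl
          (fun a i => a + pvCost (PySem.List.pyGetD full i ' ')) 0
    = (full.map pvCost).sum := by
  have hV : ((PySem.List.pyRange 0 (full.length : Int) 1).map
      (fun j => pvCost (PySem.List.pyGetD full j ' '))).sum = (full.map pvCost).sum := by
    have h := PySem.List.map_pyGetD_pyRange_zero' (xs := full) (d := ' ')
    calc ((PySem.List.pyRange 0 (full.length : Int) 1).map
            (fun j => pvCost (PySem.List.pyGetD full j ' '))).sum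
        = (((PySem.List.pyRange 0 (full.length : Int) 1).map
            (fun j => PySem.List.pyGetD full j ' ')).map pvCost).sum := by
          rw [List.map_map]; rfl
      _ = (full.map pvCost).sum := by rw [h]
  have hsplit1 : PySem.List.pyRange 0 (full.length : Int) 1
      = PySem.List.pyRange 0 s 1 ++ PySem.List.pyRange s (full.length : Int) 1 :=
    PySem.List.pyRange_one_append 0 s _ h0 (by omega)
  have hsplit2 : PySem.List.pyRange s (full.length : Int) 1
      = PySem.List.pyRange s (e + 1) 1 ++ PySem.List.pyRange (e + 1) (full.length : Int) 1 :=
    PySem.List.pyRange_one_append s (e + 1) _ (by omega) (by omega)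
  have hmid : ((PySem.List.pyRange s (e + 1) 1).map
      (fun j => pvCost (PySem.List.pyGetD full j ' '))).sum = 0 := by
    apply List.sum_eq_zero
    intro x hx
    obtain ⟨j, hj, rfl⟩ := List.mem_map.mp hx
    have hj' := (PySem.List.mem_pyRange_one).mp hj
    rw [hA j hj'.1 (by omega)]
    decide
  rw [PySem.List.foldl_add, PySem.List.foldl_add]
  rw [hsplit1, hsplit2] at hV
  simp only [List.map_append, List.sum_append] at hV
  omega

-- a character at a valid nonnegative index, read back through pyGetD
theorem pyGetD_of_getElem? (full : List Char) (j : Int) (h0 : 0 ≤ j)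
    (h : full[j.toNat]? = some 'A') : PySem.List.pyGetD full j ' ' = 'A' := by
  have hj : ((j.toNat : Nat) : Int) = j := Int.toNat_of_nonneg h0
  rw [← hj, PySem.List.pyGetD_natCast, List.getD_eq_getElem?_getD, h]
  rfl

-- The heart: A's fold over the section list equals B's single scan, run by run
theorem scan_eq_fold (full : List Char) :
    ∀ cs i, 0 ≤ i → cs = full.drop i.toNat → ∀ best,
      (pvSections cs i).foldl (pvAUpd full (full.length : Int)) best
        = pvScan cs i (full.length : Int) ((full.map pvCost).sum) best := by
  intro cs i
  induction cs, i using pvSections.induct with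
  | case1 i =>
    intro h0 hdrop best
    simp [pvSections, pvScan]
  | case2 rest i' p ih =>
    intro h0 hdrop best
    have hpdef : p = pvSkipA rest (i' + 1) := rfl
    obtain ⟨k, hk, hp2, hp1, hAll⟩ := pvSkipA_spec rest (i' + 1)
    rw [← hpdef] at hp2 hp1
    have hlen : full.length = i'.toNat + 1 + rest.length := by
      have h := congrArg List.length hdrop
      simp only [List.length_cons, List.length_drop] at h
      omega
    have hrest : rest = full.drop (i'.toNat + 1) := by
      have h1 : (full.drop i'.toNat).tail = full.drop (i'.toNat + 1) := List.tail_drop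
      rw [← hdrop] at h1
      simpa using h1
    have hdrop' : p.1 = full.drop (p.2).toNat := by
      rw [hp1, hrest, List.drop_drop]
      congr 1
      omega
    have hA : ∀ j : Int, i' ≤ j → j ≤ i' + (k : Int) → PySem.List.pyGetD full j ' ' = 'A' := by
      intro j hj1 hj2
      apply pyGetD_of_getElem? full j (by omega)
      have hjd : full[j.toNat]? = (full.drop i'.toNat)[j.toNat - i'.toNat]? := by
        rw [List.getElem?_drop]
        congr 1
        omega
      rw [hjd, ← hdrop]
      rcases Nat.eq_zero_or_pos (j.toNat - i'.toNat) with hz | hpos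
      · rw [hz]; rfl
      · obtain ⟨m, hm⟩ := Nat.exists_eq_succ_of_ne_zero (by omega : j.toNat - i'.toNat ≠ 0)
        rw [hm]
        simpa using hAll m (by omega)
    have hcount := count_eq_V full i' (i' + (k : Int)) h0 (by omega)
      (by omega) hA
    have he : p.2 - 1 = i' + (k : Int) := by rw [hp2]; ring
    have hsl1 : ((PySem.List.slice full (some ((p.2 - 1) + 1)) none).length : Int)
        = (full.length : Int) - (p.2 - 1) - 1 := by
      rw [he, PySem.List.slice_from full (show (0:Int) ≤ i' + (k : Int) + 1 by omega), List.length_drop]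
      omega
    have hsl2 : ((PySem.List.slice full none (some i')).length : Int) = i' := by
      rw [PySem.List.slice_to full h0, List.length_take]
      omega
    have hupd : pvAUpd full (full.length : Int) best (i', p.2 - 1)
        = pvBUpd (full.length : Int) ((full.map pvCost).sum) best i' (p.2 - 1) := by
      unfold pvAUpd pvBUpd
      simp only []
      rw [hsl1, hsl2]
      rw [show (PySem.List.pyRange ((p.2 - 1) + 1) (full.length : Int) 1).foldl
            (fun a i => a + pvCost (PySem.List.pyGetD full i ' ')) 0
          = (PySem.List.pyRange ((i' + (k : Int)) + 1) (full.length : Int) 1).foldl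
            (fun a i => a + pvCost (PySem.List.pyGetD full i ' ')) 0 from by rw [he]]
      rw [hcount, he]
      split_ifs with hs0 hel
      · rfl
      · rfl
      · congr 1
        ring
    have hsecs : pvSections ('A' :: rest) i' = (i', p.2 - 1) :: pvSections p.1 p.2 := by
      rw [pvSections]
      simp
      exact ⟨rfl, rfl⟩
    have hscan : pvScan ('A' :: rest) i' (full.length : Int) ((full.map pvCost).sum) best
        = pvScan p.1 p.2 (full.length : Int) ((full.map pvCost).sum)
            (pvBUpd (full.length : Int) ((full.map pvCost).sum) best i' (p.2 - 1)) := by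
      rw [pvScan]
      simp
      rfl
    rw [hsecs, List.foldl_cons, hscan, hupd]
    exact ih (by omega) hdrop' _
  | case3 c rest i' hc ih =>
    intro h0 hdrop best
    have hrest : rest = full.drop (i' + 1).toNat := by
      have h1 : (full.drop i'.toNat).tail = full.drop (i'.toNat + 1) := List.tail_drop
      rw [← hdrop] at h1
      have h2 : (i' + 1).toNat = i'.toNat + 1 := by omega
      rw [h2]
      simpa using h1
    have hsecs : pvSections (c :: rest) i' = pvSections rest (i' + 1) := by
      rw [pvSections]
      simp [hc]
    have hscan : pvScan (c :: rest) i' (full.length : Int) ((full.map pvCost).sum) best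
        = pvScan rest (i' + 1) (full.length : Int) ((full.map pvCost).sum) best := by
      rw [pvScan]
      simp [hc]
    rw [hsecs, hscan]
    exact ih (by omega) hrest best

-- on the character codes the domain admits, B's table agrees with the cost formula
theorem pvTable_getD (c : Char) (h : pvDomChar c = true) :
    PySem.List.pyGetD pvTable (c.toNat : Int) 0 = pvCost c := by
  have hlt : c.toNat < 128 := by
    unfold pvDomChar at h
    simp only [Bool.or_eq_true, Bool.and_eq_true, decide_eq_true_eq, beq_iff_eq] at h
    omega
  unfold pvTable
  rw [show (128 : Int) = ((128 : Nat) : Int) by norm_num]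
  rw [PySem.List.pyGetD_map_pyRange _ 128 c.toNat 0 hlt]
  rfl

-- ===== VERDICT (by name: the statement is the Claim_ definition above) =====
theorem solution_spec : Claim_equal_solution := by
  intro name hdom
  unfold Spec_solution solution solution_alt
  have hall : ∀ c ∈ name.toList, pvDomChar c = true := by
    unfold Dom_solution pvDomStr at hdom
    simpa [List.all_eq_true] using hdom
  have hT : name.toList.map (fun c => PySem.List.pyGetD pvTable (c.toNat : Int) 0) = name.toList.map pvCost :=
    List.map_congr_left (fun c hc => pvTable_getD c (hall c hc))
  have hV : name.toList.foldl (fun a c => a + pvCost c) 0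
      = (name.toList.map (fun c => PySem.List.pyGetD pvTable (c.toNat : Int) 0)).sum := by
    rw [PySem.List.foldl_add, hT]
    ring
  by_cases hA : name.toList.contains 'A'
  · rw [if_neg (not_not_intro hA), if_neg (not_not_intro hA), hV, hT]
    exact scan_eq_fold name.toList name.toList 0 (by omega) (by simp) _
  · rw [if_pos hA, if_pos hA, hV]
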